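-- pv_equiv track=rewrite | github.com/Slavoljub/valido | src/utils/menu_generator.py | categorize_route
-- ===== SOURCE A (Python) =====
-- def categorize_route(path: str) -> str:
--     """Categorize route into menu sections"""
--     path_lower = path.lower()
--
--     if path == '/':
--         return 'main'
--     elif 'dashboard' in path_lower:
--         return 'dashboard'
--     elif 'settings' in path_lower:
--         return 'settings'
--     elif 'chat' in path_lower:
--         return 'ai'
--     elif 'ml-alg' in path_lower or 'algorithm' in path_lower:
--         return 'ai'
--     elif 'ticketing' in path_lower or 'ticket' in path_lower:
--         return 'support'
--     elif 'auth' in path_lower or 'login' in path_lower or 'register' in path_lower: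
--         return 'auth'
--     elif 'example' in path_lower or 'test' in path_lower:
--         return 'development'
--     # Database structure routes
--     elif any(x in path_lower for x in ['companies', 'partners', 'users', 'fiscal-years', 'charts-of-accounts', 'general-ledger']):
--         return 'finance'
--     elif any(x in path_lower for x in ['invoices', 'bank', 'fixed-assets', 'budgets', 'taxes']):
--         return 'accounting'
--     elif any(x in path_lower for x in ['inventory', 'warehouses']):
--         return 'inventory'
--     elif any(x in path_lower for x in ['crm-', 'leads', 'opportunities']):
--         return 'crm'
--     elif any(x in path_lower for x in ['employees', 'payrolls']):
--         return 'hr'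
--     elif any(x in path_lower for x in ['email-', 'erp-modules', 'routes-permissions', 'audit-logs', 'demo-logs', 'llm-embeddings']):
--         return 'system'
--     else:
--         return 'other'
-- ===== SOURCE B (Python) =====
-- # Inverted index: instead of testing each keyword against the path, enumerate the
-- # substrings of the path (hash-indexed by keyword) and keep the hit of minimum priority.
-- _INDEX = {
--     'dashboard': (0, 'dashboard'),
--     'settings': (1, 'settings'),
--     'chat': (2, 'ai'),
--     'ml-alg': (3, 'ai'), 'algorithm': (3, 'ai'),
--     'ticketing': (4, 'support'), 'ticket': (4, 'support'),
--     'auth': (5, 'auth'), 'login': (5, 'auth'), 'register': (5, 'auth'),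
--     'example': (6, 'development'), 'test': (6, 'development'),
--     'companies': (7, 'finance'), 'partners': (7, 'finance'), 'users': (7, 'finance'),
--     'fiscal-years': (7, 'finance'), 'charts-of-accounts': (7, 'finance'), 'general-ledger': (7, 'finance'),
--     'invoices': (8, 'accounting'), 'bank': (8, 'accounting'), 'fixed-assets': (8, 'accounting'),
--     'budgets': (8, 'accounting'), 'taxes': (8, 'accounting'),
--     'inventory': (9, 'inventory'), 'warehouses': (9, 'inventory'),
--     'crm-': (10, 'crm'), 'leads': (10, 'crm'), 'opportunities': (10, 'crm'),
--     'employees': (11, 'hr'), 'payrolls': (11, 'hr'),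
--     'email-': (12, 'system'), 'erp-modules': (12, 'system'), 'routes-permissions': (12, 'system'),
--     'audit-logs': (12, 'system'), 'demo-logs': (12, 'system'), 'llm-embeddings': (12, 'system'),
-- }
-- _LENGTHS = sorted({len(k) for k in _INDEX})
--
--
-- def categorize_route(path: str) -> str:
--     """Categorize route into menu sections"""
--     if path == '/':
--         return 'main'
--     p = path.lower()
--     best = (13, 'other')
--     for i in range(len(p)):
--         for L in _LENGTHS:
--             hit = _INDEX.get(p[i:i + L])
--             if hit is not None and hit[0] < best[0]:
--                 best = hit
--     return best[1]
-- ===== Notes on version B (the rewrite author's own statement) =====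
-- stated objective: alternative
-- what changed: Inverts the scan: instead of A's ordered keyword-by-keyword substring tests, B enumerates every substring of the lowered path at the keyword lengths, looks each up in a hash index keyword->(priority,category), and keeps the minimum-priority hit.
import Mathlib
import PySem

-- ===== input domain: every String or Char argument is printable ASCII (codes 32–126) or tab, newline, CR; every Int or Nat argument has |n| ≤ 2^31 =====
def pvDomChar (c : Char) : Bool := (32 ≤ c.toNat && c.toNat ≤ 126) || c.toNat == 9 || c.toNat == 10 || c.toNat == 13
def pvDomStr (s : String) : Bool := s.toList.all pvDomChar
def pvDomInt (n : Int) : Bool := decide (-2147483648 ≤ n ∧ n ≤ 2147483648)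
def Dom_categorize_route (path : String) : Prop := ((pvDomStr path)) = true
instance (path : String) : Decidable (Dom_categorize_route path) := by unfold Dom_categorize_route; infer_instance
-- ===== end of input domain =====

-- B inverts A's scan: instead of ordered keyword-by-keyword substring tests, it enumerates the
-- substrings of the lowered path at the keyword lengths, looks each up in a hash index
-- keyword -> (priority, category), and returns the minimum-priority hit (alternative algorithm).

-- ===== PORT A =====
def categorize_route (path : String) : String :=
  let path_lower := PySem.Str.lower path
  if path = "/" then "main"
  else if PySem.Str.isIn "dashboard" path_lower then "dashboard"
  else if PySem.Str.isIn "settings" path_lower then "settings"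
  else if PySem.Str.isIn "chat" path_lower then "ai"
  else if PySem.Str.isIn "ml-alg" path_lower || PySem.Str.isIn "algorithm" path_lower then "ai"
  else if PySem.Str.isIn "ticketing" path_lower || PySem.Str.isIn "ticket" path_lower then "support"
  else if PySem.Str.isIn "auth" path_lower || PySem.Str.isIn "login" path_lower || PySem.Str.isIn "register" path_lower then "auth"
  else if PySem.Str.isIn "example" path_lower || PySem.Str.isIn "test" path_lower then "development"
  else if ["companies", "partners", "users", "fiscal-years", "charts-of-accounts", "general-ledger"].any (fun x => PySem.Str.isIn x path_lower) then "finance"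
  else if ["invoices", "bank", "fixed-assets", "budgets", "taxes"].any (fun x => PySem.Str.isIn x path_lower) then "accounting"
  else if ["inventory", "warehouses"].any (fun x => PySem.Str.isIn x path_lower) then "inventory"
  else if ["crm-", "leads", "opportunities"].any (fun x => PySem.Str.isIn x path_lower) then "crm"
  else if ["employees", "payrolls"].any (fun x => PySem.Str.isIn x path_lower) then "hr"
  else if ["email-", "erp-modules", "routes-permissions", "audit-logs", "demo-logs", "llm-embeddings"].any (fun x => PySem.Str.isIn x path_lower) then "system"
  else "other"

-- ===== PORT B =====
-- Source B's module-level dict _INDEX: keyword -> (priority, category)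
def pvIndex : PySem.Dict String (Nat × String) := PySem.Dict.mk
  [ ("dashboard", (0, "dashboard")),
    ("settings", (1, "settings")),
    ("chat", (2, "ai")),
    ("ml-alg", (3, "ai")), ("algorithm", (3, "ai")),
    ("ticketing", (4, "support")), ("ticket", (4, "support")),
    ("auth", (5, "auth")), ("login", (5, "auth")), ("register", (5, "auth")),
    ("example", (6, "development")), ("test", (6, "development")),
    ("companies", (7, "finance")), ("partners", (7, "finance")), ("users", (7, "finance")),
    ("fiscal-years", (7, "finance")), ("charts-of-accounts", (7, "finance")), ("general-ledger", (7, "finance")),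
    ("invoices", (8, "accounting")), ("bank", (8, "accounting")), ("fixed-assets", (8, "accounting")),
    ("budgets", (8, "accounting")), ("taxes", (8, "accounting")),
    ("inventory", (9, "inventory")), ("warehouses", (9, "inventory")),
    ("crm-", (10, "crm")), ("leads", (10, "crm")), ("opportunities", (10, "crm")),
    ("employees", (11, "hr")), ("payrolls", (11, "hr")),
    ("email-", (12, "system")), ("erp-modules", (12, "system")), ("routes-permissions", (12, "system")),
    ("audit-logs", (12, "system")), ("demo-logs", (12, "system")), ("llm-embeddings", (12, "system")) ]

-- Source B's _LENGTHS = sorted({len(k) for k in _INDEX}), a module-level constant: its value, as Nat lengths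
def pvLengths : List Nat := [4, 5, 6, 7, 8, 9, 10, 11, 12, 13, 14, 18]

def categorize_route_alt (path : String) : String :=
  if path = "/" then "main"
  else
    let p := PySem.Str.lower path
    -- for i in range(len(p)): for L in _LENGTHS: hit = _INDEX.get(p[i:i+L]); if hit and hit[0] < best[0]: best = hit
    -- (range(len p) is the Nat range 0..len-1; p[i:i+L] is PySem.List.slice with nonnegative bounds)
    let best := (List.range p.toList.length).foldl (fun best (i : Nat) =>
      pvLengths.foldl (fun best (L : Nat) =>
        match pvIndex.get? (String.ofList (PySem.List.slice p.toList (some (i : Int)) (some ((i : Int) + (L : Int))))) with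
        | some hit => if hit.1 < best.1 then hit else best
        | none => best) best) (13, "other")
    best.2

-- ===== PRECONDITION & SPEC =====
def Spec_categorize_route (path : String) (out : String) : Prop := out = categorize_route_alt path
instance (path : String) (out : String) : Decidable (Spec_categorize_route path out) := by unfold Spec_categorize_route; infer_instance

-- ===== CLAIM (what is proved, stated in full; the proofs are below) =====
def Claim_equal_categorize_route : Prop := ∀ (path : String), Dom_categorize_route path → Spec_categorize_route path (categorize_route path)

-- ===== LEMMAS AND PROOFS =====

-- rule table of A's chain: keywords and category per priority
def pvRules : List (List String) :=
  [ ["dashboard"], ["settings"], ["chat"], ["ml-alg", "algorithm"], ["ticketing", "ticket"],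
    ["auth", "login", "register"], ["example", "test"],
    ["companies", "partners", "users", "fiscal-years", "charts-of-accounts", "general-ledger"],
    ["invoices", "bank", "fixed-assets", "budgets", "taxes"], ["inventory", "warehouses"],
    ["crm-", "leads", "opportunities"], ["employees", "payrolls"],
    ["email-", "erp-modules", "routes-permissions", "audit-logs", "demo-logs", "llm-embeddings"] ]

def pvKws (r : Nat) : List String := pvRules.getD r []

def pvCatOf (r : Nat) : String :=
  ["dashboard", "settings", "ai", "ai", "support", "auth", "development", "finance",
   "accounting", "inventory", "crm", "hr", "system"].getD r "other"

def pvMatched (p : String) (r : Nat) : Bool := (pvKws r).any (fun k => PySem.Str.isIn k p)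

def pvStep (b : Nat × String) (o : Option (Nat × String)) : Nat × String :=
  match o with
  | some hit => if hit.1 < b.1 then hit else b
  | none => b

def pvMin (a : Nat) (o : Option (Nat × String)) : Nat :=
  match o with
  | some hit => min a hit.1
  | none => a

def pvCand (pl : List Char) (i L : Nat) : Option (Nat × String) :=
  pvIndex.get? (String.ofList (PySem.List.slice pl (some (i : Int)) (some ((i : Int) + (L : Int)))))

def pvCands (pl : List Char) : List (Option (Nat × String)) :=
  (List.range pl.length).flatMap (fun i => pvLengths.map (pvCand pl i))

lemma pvIndex_some (s : String) (h : Nat × String) (hg : pvIndex.get? s = some h) :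
    h.1 ≤ 12 ∧ h.2 = pvCatOf h.1 ∧ s ∈ pvKws h.1 := by
  have hmem : (s, h) ∈ pvIndex.items := PySem.Dict.mem_items_of_get?_eq_some pvIndex hg
  have hall : ∀ q ∈ pvIndex.items, q.2.1 ≤ 12 ∧ q.2.2 = pvCatOf q.2.1 ∧ q.1 ∈ pvKws q.2.1 := by decide
  exact hall _ hmem

lemma pvGoodFold (cs : List (Option (Nat × String))) (init : Nat × String)
    (h0 : init.2 = pvCatOf init.1)
    (hg : ∀ h : Nat × String, some h ∈ cs → h.2 = pvCatOf h.1) :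
    cs.foldl pvStep init = (cs.foldl pvMin init.1, pvCatOf (cs.foldl pvMin init.1)) := by
  induction cs generalizing init with
  | nil => simp [← h0]
  | cons o cs ih =>
    cases o with
    | none => simpa [pvStep, pvMin] using ih init h0 (fun h hm => hg h (by simp [hm]))
    | some hit =>
      have hhit : hit.2 = pvCatOf hit.1 := hg hit (by simp)
      simp only [List.foldl_cons, pvStep, pvMin]
      by_cases hlt : hit.1 < init.1
      · rw [if_pos hlt, min_eq_right (Nat.le_of_lt hlt)]
        exact ih hit hhit (fun h hm => hg h (by simp [hm]))
      · rw [if_neg hlt, min_eq_left (Nat.le_of_not_lt hlt)]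
        exact ih init h0 (fun h hm => hg h (by simp [hm]))

lemma pvMin_le_init (cs : List (Option (Nat × String))) (a : Nat) : cs.foldl pvMin a ≤ a := by
  induction cs generalizing a with
  | nil => simp
  | cons o cs ih =>
    cases o with
    | none => simpa [pvMin] using ih a
    | some hit => exact le_trans (ih _) (by simp [pvMin])

lemma pvMin_le_of_mem (cs : List (Option (Nat × String))) (a : Nat) (h : Nat × String)
    (hm : some h ∈ cs) : cs.foldl pvMin a ≤ h.1 := by
  induction cs generalizing a with
  | nil => simp at hm
  | cons o cs ih =>
    rcases List.mem_cons.mp hm with rfl | hm'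
    · exact le_trans (pvMin_le_init cs _) (by simp [pvMin])
    · exact ih _ hm'

lemma pvMin_cases (cs : List (Option (Nat × String))) (a : Nat) :
    cs.foldl pvMin a = a ∨ ∃ h : Nat × String, some h ∈ cs ∧ cs.foldl pvMin a = h.1 := by
  induction cs generalizing a with
  | nil => left; rfl
  | cons o cs ih =>
    cases o with
    | none =>
      rcases ih a with h | ⟨h, hm, he⟩
      · left; simpa [pvMin] using h
      · right; exact ⟨h, by simp [hm], by simpa [pvMin] using he⟩
    | some hit =>
      rcases ih (min a hit.1) with h | ⟨h, hm, he⟩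
      · rcases Nat.le_total a hit.1 with hle | hle
        · left; simpa [pvMin, min_eq_left hle] using h
        · right; exact ⟨hit, by simp, by simpa [pvMin, min_eq_right hle] using h⟩
      · right; exact ⟨h, by simp [hm], by simpa [pvMin] using he⟩

-- a hit in the candidate list comes from a keyword that is a substring of pl
lemma pvCands_matched (pl : List Char) (h : Nat × String) (hm : some h ∈ pvCands pl) :
    h.1 ≤ 12 ∧ h.2 = pvCatOf h.1 ∧ pvMatched (String.ofList pl) h.1 = true := by
  simp only [pvCands, List.mem_flatMap, List.mem_map, List.mem_range] at hm
  obtain ⟨i, hi, L, hL, hc⟩ := hm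
  rw [pvCand, PySem.List.slice_natCast_add] at hc
  obtain ⟨h12, hcat, hkey⟩ := pvIndex_some _ _ hc
  refine ⟨h12, hcat, ?_⟩
  have hinf : ((pl.drop i).take L) <:+: pl :=
    (List.take_prefix L (pl.drop i)).isInfix.trans (List.drop_suffix i pl).isInfix
  have hisin : PySem.Str.isIn (String.ofList ((pl.drop i).take L)) (String.ofList pl) = true := by
    rw [PySem.Str.isIn_eq]
    simp only [String.toList_ofList]
    exact (PySem.Chars.isIn_iff_infix _ _).mpr hinf
  exact List.any_eq_true.mpr ⟨_, hkey, hisin⟩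

-- a keyword occurring in pl produces a candidate hit of its priority
lemma pvM_le_of_kw (p : String) (kw : String) (r : Nat)
    (hk : pvIndex.get? kw = some (r, pvCatOf r)) (hL : kw.toList.length ∈ pvLengths)
    (hne : kw.toList ≠ []) (hin : PySem.Str.isIn kw p = true) :
    (pvCands p.toList).foldl pvMin 13 ≤ r := by
  rw [PySem.Str.isIn_eq] at hin
  set pl := p.toList with hpl
  obtain ⟨j, hpre⟩ := (PySem.Chars.exists_prefix_drop_iff_isIn kw.toList pl).mpr hin
  have hj : j < pl.length := by
    by_contra hc
    simp [List.drop_eq_nil_of_le (Nat.le_of_not_lt hc)] at hpre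
    exact hne (by simpa using hpre)
  have htake : (pl.drop j).take kw.toList.length = kw.toList :=
    (List.prefix_iff_eq_take.mp hpre).symm
  have hmem : some (r, pvCatOf r) ∈ pvCands pl := by
    simp only [pvCands, List.mem_flatMap, List.mem_map, List.mem_range]
    refine ⟨j, hj, kw.toList.length, hL, ?_⟩
    rw [pvCand, PySem.List.slice_natCast_add, htake]
    simpa using hk
  exact pvMin_le_of_mem _ _ _ hmem

-- the chain of A, abstracted over its 13 conditions, equals pvCatOf of the least matched priority
lemma pvChain_eq (c : Nat → Bool) (M : Nat) (hle : M ≤ 13)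
    (hmem : M = 13 ∨ c M = true) (hub : ∀ r, c r = true → M ≤ r) :
    (if c 0 then "dashboard" else if c 1 then "settings" else if c 2 then "ai"
     else if c 3 then "ai" else if c 4 then "support" else if c 5 then "auth"
     else if c 6 then "development" else if c 7 then "finance" else if c 8 then "accounting"
     else if c 9 then "inventory" else if c 10 then "crm" else if c 11 then "hr"
     else if c 12 then "system" else "other") = pvCatOf M := by
  by_cases h0 : c 0 = true
  · have hM : M = 0 := Nat.le_zero.mp (hub 0 h0)
    rw [hM, show pvCatOf 0 = "dashboard" from by decide]
    simp [h0]
  by_cases h1 : c 1 = true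
  · have hM : M = 1 := by
      have hler := hub 1 h1
      rcases hmem with rfl | hc
      · omega
      · interval_cases M
        · exact absurd hc h0
        · rfl
    rw [hM, show pvCatOf 1 = "settings" from by decide]
    simp [h0, h1]
  by_cases h2 : c 2 = true
  · have hM : M = 2 := by
      have hler := hub 2 h2
      rcases hmem with rfl | hc
      · omega
      · interval_cases M
        · exact absurd hc h0
        · exact absurd hc h1
        · rfl
    rw [hM, show pvCatOf 2 = "ai" from by decide]
    simp [h0, h1, h2]
  by_cases h3 : c 3 = true
  · have hM : M = 3 := by
      have hler := hub 3 h3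
      rcases hmem with rfl | hc
      · omega
      · interval_cases M
        · exact absurd hc h0
        · exact absurd hc h1
        · exact absurd hc h2
        · rfl
    rw [hM, show pvCatOf 3 = "ai" from by decide]
    simp [h0, h1, h2, h3]
  by_cases h4 : c 4 = true
  · have hM : M = 4 := by
      have hler := hub 4 h4
      rcases hmem with rfl | hc
      · omega
      · interval_cases M
        · exact absurd hc h0
        · exact absurd hc h1
        · exact absurd hc h2
        · exact absurd hc h3
        · rfl
    rw [hM, show pvCatOf 4 = "support" from by decide]
    simp [h0, h1, h2, h3, h4]
  by_cases h5 : c 5 = true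
  · have hM : M = 5 := by
      have hler := hub 5 h5
      rcases hmem with rfl | hc
      · omega
      · interval_cases M
        · exact absurd hc h0
        · exact absurd hc h1
        · exact absurd hc h2
        · exact absurd hc h3
        · exact absurd hc h4
        · rfl
    rw [hM, show pvCatOf 5 = "auth" from by decide]
    simp [h0, h1, h2, h3, h4, h5]
  by_cases h6 : c 6 = true
  · have hM : M = 6 := by
      have hler := hub 6 h6
      rcases hmem with rfl | hc
      · omega
      · interval_cases M
        · exact absurd hc h0
        · exact absurd hc h1
        · exact absurd hc h2
        · exact absurd hc h3
        · exact absurd hc h4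
        · exact absurd hc h5
        · rfl
    rw [hM, show pvCatOf 6 = "development" from by decide]
    simp [h0, h1, h2, h3, h4, h5, h6]
  by_cases h7 : c 7 = true
  · have hM : M = 7 := by
      have hler := hub 7 h7
      rcases hmem with rfl | hc
      · omega
      · interval_cases M
        · exact absurd hc h0
        · exact absurd hc h1
        · exact absurd hc h2
        · exact absurd hc h3
        · exact absurd hc h4
        · exact absurd hc h5
        · exact absurd hc h6
        · rfl
    rw [hM, show pvCatOf 7 = "finance" from by decide]
    simp [h0, h1, h2, h3, h4, h5, h6, h7]
  by_cases h8 : c 8 = true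
  · have hM : M = 8 := by
      have hler := hub 8 h8
      rcases hmem with rfl | hc
      · omega
      · interval_cases M
        · exact absurd hc h0
        · exact absurd hc h1
        · exact absurd hc h2
        · exact absurd hc h3
        · exact absurd hc h4
        · exact absurd hc h5
        · exact absurd hc h6
        · exact absurd hc h7
        · rfl
    rw [hM, show pvCatOf 8 = "accounting" from by decide]
    simp [h0, h1, h2, h3, h4, h5, h6, h7, h8]
  by_cases h9 : c 9 = true
  · have hM : M = 9 := by
      have hler := hub 9 h9
      rcases hmem with rfl | hc
      · omega
      · interval_cases M
        · exact absurd hc h0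
        · exact absurd hc h1
        · exact absurd hc h2
        · exact absurd hc h3
        · exact absurd hc h4
        · exact absurd hc h5
        · exact absurd hc h6
        · exact absurd hc h7
        · exact absurd hc h8
        · rfl
    rw [hM, show pvCatOf 9 = "inventory" from by decide]
    simp [h0, h1, h2, h3, h4, h5, h6, h7, h8, h9]
  by_cases h10 : c 10 = true
  · have hM : M = 10 := by
      have hler := hub 10 h10
      rcases hmem with rfl | hc
      · omega
      · interval_cases M
        · exact absurd hc h0
        · exact absurd hc h1
        · exact absurd hc h2
        · exact absurd hc h3
        · exact absurd hc h4
        · exact absurd hc h5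
        · exact absurd hc h6
        · exact absurd hc h7
        · exact absurd hc h8
        · exact absurd hc h9
        · rfl
    rw [hM, show pvCatOf 10 = "crm" from by decide]
    simp [h0, h1, h2, h3, h4, h5, h6, h7, h8, h9, h10]
  by_cases h11 : c 11 = true
  · have hM : M = 11 := by
      have hler := hub 11 h11
      rcases hmem with rfl | hc
      · omega
      · interval_cases M
        · exact absurd hc h0
        · exact absurd hc h1
        · exact absurd hc h2
        · exact absurd hc h3
        · exact absurd hc h4
        · exact absurd hc h5
        · exact absurd hc h6
        · exact absurd hc h7
        · exact absurd hc h8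
        · exact absurd hc h9
        · exact absurd hc h10
        · rfl
    rw [hM, show pvCatOf 11 = "hr" from by decide]
    simp [h0, h1, h2, h3, h4, h5, h6, h7, h8, h9, h10, h11]
  by_cases h12 : c 12 = true
  · have hM : M = 12 := by
      have hler := hub 12 h12
      rcases hmem with rfl | hc
      · omega
      · interval_cases M
        · exact absurd hc h0
        · exact absurd hc h1
        · exact absurd hc h2
        · exact absurd hc h3
        · exact absurd hc h4
        · exact absurd hc h5
        · exact absurd hc h6
        · exact absurd hc h7
        · exact absurd hc h8
        · exact absurd hc h9
        · exact absurd hc h10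
        · exact absurd hc h11
        · rfl
    rw [hM, show pvCatOf 12 = "system" from by decide]
    simp [h0, h1, h2, h3, h4, h5, h6, h7, h8, h9, h10, h11, h12]
  have hM : M = 13 := by
    rcases hmem with rfl | hc
    · rfl
    · interval_cases M
      · exact absurd hc h0
      · exact absurd hc h1
      · exact absurd hc h2
      · exact absurd hc h3
      · exact absurd hc h4
      · exact absurd hc h5
      · exact absurd hc h6
      · exact absurd hc h7
      · exact absurd hc h8
      · exact absurd hc h9
      · exact absurd hc h10
      · exact absurd hc h11
      · exact absurd hc h12
      · rfl
  rw [hM, show pvCatOf 13 = "other" from by decide]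
  simp [h0, h1, h2, h3, h4, h5, h6, h7, h8, h9, h10, h11, h12]

lemma pvB_key (pl : List Char) :
    ((List.range pl.length).foldl (fun best (i : Nat) =>
      pvLengths.foldl (fun best (L : Nat) =>
        match pvIndex.get? (String.ofList (PySem.List.slice pl (some (i : Int)) (some ((i : Int) + (L : Int))))) with
        | some hit => if hit.1 < best.1 then hit else best
        | none => best) best) ((13 : Nat), "other")).2
    = pvCatOf ((pvCands pl).foldl pvMin 13) := by
  have h1 : (fun (best : Nat × String) (i : Nat) =>
      pvLengths.foldl (fun best (L : Nat) =>
        match pvIndex.get? (String.ofList (PySem.List.slice pl (some (i : Int)) (some ((i : Int) + (L : Int))))) with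
        | some hit => if hit.1 < best.1 then hit else best
        | none => best) best)
      = fun best i => (pvLengths.map (pvCand pl i)).foldl pvStep best := by
    funext b i
    rw [List.foldl_map]
    rfl
  rw [h1, show (List.range pl.length).foldl (fun b i => (pvLengths.map (pvCand pl i)).foldl pvStep b) ((13 : Nat), "other")
        = (pvCands pl).foldl pvStep ((13 : Nat), "other") from by rw [pvCands, List.foldl_flatMap]]
  rw [pvGoodFold _ _ (by decide) (fun h hm => (pvCands_matched pl h hm).2.1)]

lemma pvB_val (path : String) (hne : ¬ path = "/") :
    categorize_route_alt path =
      pvCatOf ((pvCands (PySem.Str.lower path).toList).foldl pvMin 13) := by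
  simpa only [categorize_route_alt, if_neg hne] using pvB_key (PySem.Str.lower path).toList

-- ===== VERDICT (by name: the statement is the Claim_ definition above) =====
theorem categorize_route_spec : Claim_equal_categorize_route := by
  intro path _
  unfold Spec_categorize_route
  by_cases hroot : path = "/"
  · simp [categorize_route, categorize_route_alt, hroot]
  · rw [pvB_val path hroot]
    have hofl : String.ofList (PySem.Str.lower path).toList = PySem.Str.lower path :=
      String.ofList_toList
    set p := PySem.Str.lower path with hp
    set M := (pvCands p.toList).foldl pvMin 13 with hMdef
    have hle : M ≤ 13 := pvMin_le_init _ _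
    have hmem : M = 13 ∨ pvMatched p M = true := by
      rcases pvMin_cases (pvCands p.toList) 13 with he | ⟨h, hm, he⟩
      · left; exact he
      · right
        obtain ⟨_, _, hmt⟩ := pvCands_matched _ _ hm
        rw [hMdef, he]
        rwa [hofl] at hmt
    have hub : ∀ r, pvMatched p r = true → M ≤ r := by
      intro r hr
      rw [hMdef]
      by_cases h13 : r ≤ 12
      · interval_cases r
        · simp [pvMatched, pvKws, pvRules] at hr
          exact pvM_le_of_kw p "dashboard" 0 (by decide) (by decide) (by decide) hr
        · simp [pvMatched, pvKws, pvRules] at hr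
          exact pvM_le_of_kw p "settings" 1 (by decide) (by decide) (by decide) hr
        · simp [pvMatched, pvKws, pvRules] at hr
          exact pvM_le_of_kw p "chat" 2 (by decide) (by decide) (by decide) hr
        · simp [pvMatched, pvKws, pvRules] at hr
          rcases hr with hr|hr
          · exact pvM_le_of_kw p "ml-alg" 3 (by decide) (by decide) (by decide) hr
          · exact pvM_le_of_kw p "algorithm" 3 (by decide) (by decide) (by decide) hr
        · simp [pvMatched, pvKws, pvRules] at hr
          rcases hr with hr|hr
          · exact pvM_le_of_kw p "ticketing" 4 (by decide) (by decide) (by decide) hr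
          · exact pvM_le_of_kw p "ticket" 4 (by decide) (by decide) (by decide) hr
        · simp [pvMatched, pvKws, pvRules] at hr
          rcases hr with hr|hr|hr
          · exact pvM_le_of_kw p "auth" 5 (by decide) (by decide) (by decide) hr
          · exact pvM_le_of_kw p "login" 5 (by decide) (by decide) (by decide) hr
          · exact pvM_le_of_kw p "register" 5 (by decide) (by decide) (by decide) hr
        · simp [pvMatched, pvKws, pvRules] at hr
          rcases hr with hr|hr
          · exact pvM_le_of_kw p "example" 6 (by decide) (by decide) (by decide) hr
          · exact pvM_le_of_kw p "test" 6 (by decide) (by decide) (by decide) hr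
        · simp [pvMatched, pvKws, pvRules] at hr
          rcases hr with hr|hr|hr|hr|hr|hr
          · exact pvM_le_of_kw p "companies" 7 (by decide) (by decide) (by decide) hr
          · exact pvM_le_of_kw p "partners" 7 (by decide) (by decide) (by decide) hr
          · exact pvM_le_of_kw p "users" 7 (by decide) (by decide) (by decide) hr
          · exact pvM_le_of_kw p "fiscal-years" 7 (by decide) (by decide) (by decide) hr
          · exact pvM_le_of_kw p "charts-of-accounts" 7 (by decide) (by decide) (by decide) hr
          · exact pvM_le_of_kw p "general-ledger" 7 (by decide) (by decide) (by decide) hr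
        · simp [pvMatched, pvKws, pvRules] at hr
          rcases hr with hr|hr|hr|hr|hr
          · exact pvM_le_of_kw p "invoices" 8 (by decide) (by decide) (by decide) hr
          · exact pvM_le_of_kw p "bank" 8 (by decide) (by decide) (by decide) hr
          · exact pvM_le_of_kw p "fixed-assets" 8 (by decide) (by decide) (by decide) hr
          · exact pvM_le_of_kw p "budgets" 8 (by decide) (by decide) (by decide) hr
          · exact pvM_le_of_kw p "taxes" 8 (by decide) (by decide) (by decide) hr
        · simp [pvMatched, pvKws, pvRules] at hr
          rcases hr with hr|hr
          · exact pvM_le_of_kw p "inventory" 9 (by decide) (by decide) (by decide) hr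
          · exact pvM_le_of_kw p "warehouses" 9 (by decide) (by decide) (by decide) hr
        · simp [pvMatched, pvKws, pvRules] at hr
          rcases hr with hr|hr|hr
          · exact pvM_le_of_kw p "crm-" 10 (by decide) (by decide) (by decide) hr
          · exact pvM_le_of_kw p "leads" 10 (by decide) (by decide) (by decide) hr
          · exact pvM_le_of_kw p "opportunities" 10 (by decide) (by decide) (by decide) hr
        · simp [pvMatched, pvKws, pvRules] at hr
          rcases hr with hr|hr
          · exact pvM_le_of_kw p "employees" 11 (by decide) (by decide) (by decide) hr
          · exact pvM_le_of_kw p "payrolls" 11 (by decide) (by decide) (by decide) hr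
        · simp [pvMatched, pvKws, pvRules] at hr
          rcases hr with hr|hr|hr|hr|hr|hr
          · exact pvM_le_of_kw p "email-" 12 (by decide) (by decide) (by decide) hr
          · exact pvM_le_of_kw p "erp-modules" 12 (by decide) (by decide) (by decide) hr
          · exact pvM_le_of_kw p "routes-permissions" 12 (by decide) (by decide) (by decide) hr
          · exact pvM_le_of_kw p "audit-logs" 12 (by decide) (by decide) (by decide) hr
          · exact pvM_le_of_kw p "demo-logs" 12 (by decide) (by decide) (by decide) hr
          · exact pvM_le_of_kw p "llm-embeddings" 12 (by decide) (by decide) (by decide) hr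
      · exfalso
        have hnil : pvKws r = [] := List.getD_eq_default _ _ (by simp [pvRules]; omega)
        simp [pvMatched, hnil] at hr
    have m0 : PySem.Str.isIn "dashboard" p = pvMatched p 0 := by
      simp [pvMatched, pvKws, pvRules]
    have m1 : PySem.Str.isIn "settings" p = pvMatched p 1 := by
      simp [pvMatched, pvKws, pvRules]
    have m2 : PySem.Str.isIn "chat" p = pvMatched p 2 := by
      simp [pvMatched, pvKws, pvRules]
    have m3 : (PySem.Str.isIn "ml-alg" p || PySem.Str.isIn "algorithm" p) = pvMatched p 3 := by
      simp [pvMatched, pvKws, pvRules]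
    have m4 : (PySem.Str.isIn "ticketing" p || PySem.Str.isIn "ticket" p) = pvMatched p 4 := by
      simp [pvMatched, pvKws, pvRules]
    have m5 : (PySem.Str.isIn "auth" p || PySem.Str.isIn "login" p || PySem.Str.isIn "register" p) = pvMatched p 5 := by
      simp [pvMatched, pvKws, pvRules, Bool.or_assoc]
    have m6 : (PySem.Str.isIn "example" p || PySem.Str.isIn "test" p) = pvMatched p 6 := by
      simp [pvMatched, pvKws, pvRules]
    have m7 : (["companies", "partners", "users", "fiscal-years", "charts-of-accounts", "general-ledger"]).any (fun x => PySem.Str.isIn x p) = pvMatched p 7 := rfl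
    have m8 : (["invoices", "bank", "fixed-assets", "budgets", "taxes"]).any (fun x => PySem.Str.isIn x p) = pvMatched p 8 := rfl
    have m9 : (["inventory", "warehouses"]).any (fun x => PySem.Str.isIn x p) = pvMatched p 9 := rfl
    have m10 : (["crm-", "leads", "opportunities"]).any (fun x => PySem.Str.isIn x p) = pvMatched p 10 := rfl
    have m11 : (["employees", "payrolls"]).any (fun x => PySem.Str.isIn x p) = pvMatched p 11 := rfl
    have m12 : (["email-", "erp-modules", "routes-permissions", "audit-logs", "demo-logs", "llm-embeddings"]).any (fun x => PySem.Str.isIn x p) = pvMatched p 12 := rfl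
    unfold categorize_route
    rw [if_neg hroot, m0, m1, m2, m3, m4, m5, m6, m7, m8, m9, m10, m11, m12]
    exact pvChain_eq (pvMatched p) M hle hmem hub
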